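-- pv_equiv track=rewrite | github.com/doldecomp/melee | tools/m2c/m2c/c_types.py | divmod_towards_zero
-- ===== SOURCE A (Python) =====
-- def divmod_towards_zero(lhs: int, rhs: int, op: str) -> int:
--     if rhs < 0:
--         rhs = -rhs
--         lhs = -lhs
--     if lhs < 0:
--         return -divmod_towards_zero(-lhs, rhs, op)
--     if op == "/":
--         return lhs // rhs
--     else:
--         return lhs % rhs
-- ===== SOURCE B (Python) =====
-- def divmod_towards_zero(lhs: int, rhs: int, op: str) -> int:
--     a = abs(lhs)
--     b = abs(rhs)
--     q = a // b if op == "/" else a % b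
--     return -q if (lhs < 0) != (rhs < 0) else q
-- ===== Notes on version B (the rewrite author's own statement) =====
-- stated objective: simpler
-- what changed: Replaced A's recursive sign-normalization (negate both operands when rhs<0, recurse when lhs<0) with a direct sign-and-magnitude closed form: compute abs(lhs)//abs(rhs) or abs(lhs)%abs(rhs) and negate once when the operand signs differ.
-- outside the precondition, e.g. on divmod_towards_zero(5, 0, '/'): A raises ZeroDivisionError, B raises ZeroDivisionError
import Mathlib
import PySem

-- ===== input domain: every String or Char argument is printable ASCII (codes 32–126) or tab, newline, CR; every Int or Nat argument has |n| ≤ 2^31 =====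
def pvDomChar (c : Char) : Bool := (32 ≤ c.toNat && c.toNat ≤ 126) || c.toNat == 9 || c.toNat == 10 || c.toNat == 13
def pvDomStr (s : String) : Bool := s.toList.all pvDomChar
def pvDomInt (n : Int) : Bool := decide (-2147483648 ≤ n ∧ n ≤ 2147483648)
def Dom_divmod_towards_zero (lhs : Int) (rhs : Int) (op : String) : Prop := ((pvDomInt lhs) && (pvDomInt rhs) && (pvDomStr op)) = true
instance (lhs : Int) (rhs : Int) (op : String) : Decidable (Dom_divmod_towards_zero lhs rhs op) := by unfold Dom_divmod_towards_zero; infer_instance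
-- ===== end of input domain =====

-- B replaces A's recursive sign-normalization with a direct sign-and-magnitude closed form (simpler; same cost).

-- ===== PORT A =====
-- A reassigns (lhs, rhs) := (-lhs, -rhs) when rhs < 0 and then re-runs the remaining body;
-- this fall-through is transcribed as a tail call with the negated arguments.
def divmod_towards_zero (lhs : Int) (rhs : Int) (op : String) : Int :=
  if rhs < 0 then
    divmod_towards_zero (-lhs) (-rhs) op
  else if lhs < 0 then
    -(divmod_towards_zero (-lhs) rhs op)
  else if op = "/" then
    PySem.Int.floordiv lhs rhs
  else
    PySem.Int.mod lhs rhs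
termination_by ((if rhs < 0 then 2 else 0) + (if lhs < 0 then 1 else 0) : Nat)
decreasing_by
  · split_ifs <;> omega
  · split_ifs <;> omega

-- ===== PORT B =====
def divmod_towards_zero_alt (lhs : Int) (rhs : Int) (op : String) : Int :=
  let a := |lhs|
  let b := |rhs|
  let q := if op = "/" then PySem.Int.floordiv a b else PySem.Int.mod a b
  if (decide (lhs < 0)) ≠ (decide (rhs < 0)) then -q else q

-- ===== PRECONDITION & SPEC =====
-- Pre_ excludes rhs = 0, where Python A raises ZeroDivisionError (and B raises too).
def Pre_divmod_towards_zero (lhs : Int) (rhs : Int) (op : String) : Prop := rhs ≠ 0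
instance (lhs : Int) (rhs : Int) (op : String) : Decidable (Pre_divmod_towards_zero lhs rhs op) := by unfold Pre_divmod_towards_zero; infer_instance
def pvWitness_divmod_towards_zero : Int × Int × String := (-7, 3, "/")

def Spec_divmod_towards_zero (lhs : Int) (rhs : Int) (op : String) (out : Int) : Prop := out = divmod_towards_zero_alt lhs rhs op
instance (lhs : Int) (rhs : Int) (op : String) (out : Int) : Decidable (Spec_divmod_towards_zero lhs rhs op out) := by unfold Spec_divmod_towards_zero; infer_instance

-- ===== CLAIM (what is proved, stated in full; the proofs are below) =====
def Claim_equal_divmod_towards_zero : Prop := ∀ (lhs : Int) (rhs : Int) (op : String), Dom_divmod_towards_zero lhs rhs op → Pre_divmod_towards_zero lhs rhs op → Spec_divmod_towards_zero lhs rhs op (divmod_towards_zero lhs rhs op)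

-- ===== LEMMAS AND PROOFS =====

theorem floordiv_zero_left (b : Int) : PySem.Int.floordiv 0 b = 0 := by
  simp [PySem.Int.floordiv]

theorem mod_zero_left (b : Int) : PySem.Int.mod 0 b = 0 := by
  simp [PySem.Int.mod]

-- characterisation of A on rhs ≠ 0
theorem divmod_eq_alt (lhs rhs : Int) (op : String) (h : rhs ≠ 0) :
    divmod_towards_zero lhs rhs op = divmod_towards_zero_alt lhs rhs op := by
  rcases lt_trichotomy rhs 0 with hr | hr | hr
  · -- rhs < 0
    rw [divmod_towards_zero]
    rw [if_pos hr]
    rcases lt_trichotomy lhs 0 with hl | hl | hl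
    · -- lhs < 0, so -lhs > 0: inner call takes the nonneg path
      rw [divmod_towards_zero]
      rw [if_neg (by omega), if_neg (by omega)]
      simp only [divmod_towards_zero_alt]
      rw [abs_of_neg hl, abs_of_neg hr]
      simp [hl, hr]
    · -- lhs = 0
      subst hl
      rw [divmod_towards_zero]
      rw [if_neg (by omega), if_neg (by omega)]
      simp only [divmod_towards_zero_alt]
      simp [hr, floordiv_zero_left, mod_zero_left]
    · -- lhs > 0, so -lhs < 0: inner call negates and recurses once more
      rw [divmod_towards_zero]
      rw [if_neg (by omega), if_pos (by omega)]
      rw [divmod_towards_zero]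
      rw [if_neg (by omega), if_neg (by omega)]
      simp only [divmod_towards_zero_alt]
      rw [abs_of_pos hl, abs_of_neg hr]
      simp [not_lt.mpr (le_of_lt hl), hr]
  · exact absurd hr h
  · -- rhs > 0
    rw [divmod_towards_zero]
    rw [if_neg (by omega)]
    rcases lt_or_ge lhs 0 with hl | hl
    · rw [if_pos hl]
      rw [divmod_towards_zero]
      rw [if_neg (by omega), if_neg (by omega)]
      simp only [divmod_towards_zero_alt]
      rw [abs_of_neg hl, abs_of_pos hr]
      simp [hl, not_lt.mpr (le_of_lt hr)]
    · rw [if_neg (not_lt.mpr hl)]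
      simp only [divmod_towards_zero_alt]
      rw [abs_of_nonneg hl, abs_of_pos hr]
      simp [not_lt.mpr hl, not_lt.mpr (le_of_lt hr)]

-- ===== VERDICT (by name: the statement is the Claim_ definition above) =====
theorem divmod_towards_zero_spec : Claim_equal_divmod_towards_zero := by
  intro lhs rhs op _ hpre
  unfold Spec_divmod_towards_zero
  exact divmod_eq_alt lhs rhs op hpre
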